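-- pv_equiv track=rewrite | github.com/miliar/Code_Jam_Webscraper | solutions_python/solutions_year17_round0_nr1/1166.py | solve_left
-- ===== SOURCE A (Python) =====
-- def happy(b):
--     if b == "+":
--         return True
--     return False
--
-- def range_sum_left(L,r,i):
--     if i<r:
--         return L[i]
--     return L[i] - L[i-r]
--
-- def solve_left(s, k):
--     l = len(s)
--     sol_string = ""
--     cummu_table = []
--     count = 0
--     if happy(s[0]):
--         sol_string += "0"
--         cummu_table.append(0)
--     else:
--         sol_string += "1"
--         cummu_table.append(1)
--         count += 1
--     for i in range(1,l-k+1):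
--         b = s[i]
--         flip = False
--         cummu = range_sum_left(cummu_table, k-1, i-1)
--
--         if happy(b):
--             if cummu%2:
--                 flip = True
--             else:
--                 flip = False
--         else:
--             if cummu%2:
--                 flip = False
--             else:
--                 flip = True
--         if flip:
--             sol_string += "1"
--             cummu_table.append(cummu_table[i-1]+1)
--             count += 1
--         else:
--             sol_string += "0"
--             cummu_table.append(cummu_table[i-1])
--     return count, cummu_table
-- ===== SOURCE B (Python) =====
-- def solve_left(s, k):
--     # B: no window counter and no prefix-table lookup while deciding flips.
--     # The greedy invariant "every processed position ends up happy" gives the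
--     # stride-k recurrence flip[i] = (happy(s[i-1]) != happy(s[i])) xor flip[i-k].
--     flips = [0 if s[0] == "+" else 1]
--     for i in range(1, len(s) - k + 1):
--         d = 1 if (s[i - 1] == "+") != (s[i] == "+") else 0
--         flips.append((d + flips[i - k]) % 2 if i >= k else d)
--     table = []
--     total = 0
--     for f in flips:
--         total += f
--         table.append(total)
--     return total, table
-- ===== Notes on version B (the rewrite author's own statement) =====
-- stated objective: alternative
-- what changed: B drops A's window machinery entirely: instead of deciding each flip from the parity of flips in the preceding size-(k-1) window (read off a cumulative prefix table via range_sum_left), B uses the greedy invariant 'every processed position ends up happy' to derive the stride-k recurrence flip[i] = (happy(s[i-1]) != happy(s[i])) xor flip[i-k], computes the flip list from adjacent character pairs alone, and then builds the cumulative table and count in a separate prefix-sum pass.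
import Mathlib
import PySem

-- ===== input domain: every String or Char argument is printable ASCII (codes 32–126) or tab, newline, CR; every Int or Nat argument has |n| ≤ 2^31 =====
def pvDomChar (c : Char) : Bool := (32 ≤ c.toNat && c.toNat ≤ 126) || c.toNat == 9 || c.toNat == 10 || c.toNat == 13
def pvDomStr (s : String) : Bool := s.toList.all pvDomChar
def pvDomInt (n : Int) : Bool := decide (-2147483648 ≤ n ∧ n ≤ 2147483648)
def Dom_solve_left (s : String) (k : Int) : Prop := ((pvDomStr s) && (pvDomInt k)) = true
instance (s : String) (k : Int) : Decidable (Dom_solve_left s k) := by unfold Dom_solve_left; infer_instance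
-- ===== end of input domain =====

-- B replaces A's window-parity decision (prefix table + range_sum_left) by the
-- stride-k recurrence flip[i] = (happy(s[i-1]) != happy(s[i])) xor flip[i-k],
-- plus a separate prefix-sum pass; equal return value on Pre_ below.

-- ===== PORT A =====
def pyHappy (b : Char) : Bool := b == '+'

def rangeSumLeft (L : List Int) (r i : Int) : Int :=
  if i < r then PySem.List.pyGetD L i 0
  else PySem.List.pyGetD L i 0 - PySem.List.pyGetD L (i - r) 0

-- loop body of A; state = (sol_string, cummu_table, count); sol_string is dead code A builds
def stepA (cs : List Char) (k : Int) (st : List Char × List Int × Int) (i : Int) :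
    List Char × List Int × Int :=
  let b := PySem.List.pyGetD cs i ' '
  let cummu := rangeSumLeft st.2.1 (k - 1) (i - 1)
  let flip : Bool :=
    if pyHappy b then (PySem.Int.mod cummu 2 != 0) else !(PySem.Int.mod cummu 2 != 0)
  if flip then (st.1 ++ ['1'], st.2.1 ++ [PySem.List.pyGetD st.2.1 (i - 1) 0 + 1], st.2.2 + 1)
  else (st.1 ++ ['0'], st.2.1 ++ [PySem.List.pyGetD st.2.1 (i - 1) 0], st.2.2)

def solve_left (s : String) (k : Int) : Int × List Int :=
  let cs := s.toList
  let l : Int := cs.length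
  let init : List Char × List Int × Int :=
    if pyHappy (PySem.List.pyGetD cs 0 ' ') then (['0'], [0], 0) else (['1'], [1], 1)
  let res := (PySem.List.pyRange 1 (l - k + 1) 1).foldl (stepA cs k) init
  (res.2.2, res.2.1)

-- ===== PORT B =====
-- pass-1 body: state = the flip list; flip[i] = (happy(s[i-1]) != happy(s[i])) xor flip[i-k]
def stepB (cs : List Char) (k : Int) (fl : List Int) (i : Int) : List Int :=
  let d : Int :=
    if ((PySem.List.pyGetD cs (i - 1) ' ' == '+') != (PySem.List.pyGetD cs i ' ' == '+')) then 1
    else 0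
  fl ++ [if i ≥ k then PySem.Int.mod (d + PySem.List.pyGetD fl (i - k) 0) 2 else d]

-- pass-2 body: state = (table, total)
def stepP (st : List Int × Int) (f : Int) : List Int × Int := (st.1 ++ [st.2 + f], st.2 + f)

def solve_left_alt (s : String) (k : Int) : Int × List Int :=
  let cs := s.toList
  let f0 : Int := if PySem.List.pyGetD cs 0 ' ' == '+' then 0 else 1
  let fl := (PySem.List.pyRange 1 ((cs.length : Int) - k + 1) 1).foldl (stepB cs k) [f0]
  let p2 := fl.foldl stepP ([], 0)
  (p2.2, p2.1)

-- ===== PRECONDITION & SPEC =====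
-- Pre_ excludes exactly the inputs where the Python A raises IndexError:
-- the empty string (s[0]) and k ≤ 0 (the loop then reads s[len(s)]).
def Pre_solve_left (s : String) (k : Int) : Prop := s.toList ≠ [] ∧ 1 ≤ k
instance (s : String) (k : Int) : Decidable (Pre_solve_left s k) := by
  unfold Pre_solve_left; infer_instance

def pvWitness_solve_left : String × Int := ("-+", 1)

def Spec_solve_left (s : String) (k : Int) (out : Int × List Int) : Prop := out = solve_left_alt s k
instance (s : String) (k : Int) (out : Int × List Int) : Decidable (Spec_solve_left s k out) := by
  unfold Spec_solve_left; infer_instance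

-- ===== CLAIM (what is proved, stated in full; the proofs are below) =====
def Claim_equal_solve_left : Prop := ∀ (s : String) (k : Int),
  Dom_solve_left s k → Pre_solve_left s k → Spec_solve_left s k (solve_left s k)

-- ===== LEMMAS AND PROOFS =====

-- prefix sums starting from a
def pref (a : Int) : List Int → List Int
  | [] => []
  | f :: fs => (a + f) :: pref (a + f) fs

lemma pref_append (a : Int) (fs : List Int) (f : Int) :
    pref a (fs ++ [f]) = pref a fs ++ [a + fs.sum + f] := by
  induction fs generalizing a with
  | nil => simp [pref]
  | cons g gs ih => simp [pref, ih, add_assoc]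

lemma pref_getD (a : Int) (fs : List Int) (j : Nat) (hj : j < fs.length) :
    (pref a fs).getD j 0 = a + (fs.take (j + 1)).sum := by
  induction fs generalizing a j with
  | nil => simp at hj
  | cons f gs ih =>
    cases j with
    | zero => simp [pref]
    | succ j =>
      simp only [pref, List.getD_cons_succ, List.take_succ_cons, List.sum_cons]
      rw [ih (a + f) j (by simpa using hj)]
      ring

lemma sum_take_drop (fs : List Int) (m : Nat) :
    (fs.take m).sum + (fs.drop m).sum = fs.sum := by
  rw [← List.sum_append, List.take_append_drop]

lemma sum_drop_succ (fs : List Int) (m : Nat) (hm : m < fs.length) :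
    (fs.drop m).sum = fs.getD m 0 + (fs.drop (m + 1)).sum := by
  rw [List.drop_eq_getElem_cons hm, List.sum_cons, List.getD_eq_getElem _ _ hm]

-- pass 2 builds the prefix-sum table and the running total
lemma pass2_eq (fs acc : List Int) (t : Int) :
    fs.foldl stepP (acc, t) = (acc ++ pref t fs, t + fs.sum) := by
  induction fs generalizing acc t with
  | nil => simp [pref]
  | cons f gs ih =>
    simp only [List.foldl_cons, stepP, ih, pref, List.sum_cons]
    rw [Prod.mk.injEq]
    exact ⟨by simp, by ring⟩

-- the table entry cummu_table[i-1] is the sum of all flips so far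
lemma table_last (i : Int) (fl : List Int) (hi : 1 ≤ i) (hfl : fl.length = i.toNat) :
    PySem.List.pyGetD (pref 0 fl) (i - 1) 0 = fl.sum := by
  rw [show (i - 1) = ((i.toNat - 1 : Nat) : Int) by omega, PySem.List.pyGetD_natCast,
      pref_getD 0 fl (i.toNat - 1) (by omega),
      show i.toNat - 1 + 1 = fl.length by omega, List.take_length]
  ring

-- one step: B appends a flip f ∈ {0,1}; A appends the matching table entry / count,
-- and the window-parity invariant (flips in [i+1-k, i] have the parity of ¬happy(s[i]))
-- is maintained
lemma step_eq (cs : List Char) (k i : Int) (fl : List Int) (σ : List Char)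
    (hk : 1 ≤ k) (hi : 1 ≤ i) (hfl : fl.length = i.toNat)
    (h01 : ∀ x ∈ fl, x = 0 ∨ x = 1)
    (hinv : (fl.drop (i - k).toNat).sum % 2
        = (if PySem.List.pyGetD cs (i - 1) ' ' == '+' then 0 else 1)) :
    ∃ f : Int,
      stepB cs k fl i = fl ++ [f] ∧ (f = 0 ∨ f = 1) ∧
      (stepA cs k (σ, pref 0 fl, fl.sum) i).2 = (pref 0 (fl ++ [f]), (fl ++ [f]).sum) ∧
      ((fl ++ [f]).drop (i + 1 - k).toNat).sum % 2
        = (if PySem.List.pyGetD cs i ' ' == '+' then 0 else 1) := by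
  have hmod : ∀ x : Int, PySem.Int.mod x 2 = x % 2 := fun x =>
    PySem.Int.mod_eq_emod_of_pos (by omega)
  -- A's cummu equals the sum of flips in the window [i+1-k, i-1]
  have hc : rangeSumLeft (pref 0 fl) (k - 1) (i - 1) = (fl.drop (i + 1 - k).toNat).sum := by
    unfold rangeSumLeft
    by_cases h1 : i - 1 < k - 1
    · rw [if_pos h1, table_last i fl hi hfl, show (i + 1 - k).toNat = 0 by omega, List.drop_zero]
    · rw [if_neg h1, table_last i fl hi hfl,
          show (i - 1 - (k - 1)) = (((i - k).toNat : Nat) : Int) by omega,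
          PySem.List.pyGetD_natCast, pref_getD 0 fl (i - k).toNat (by omega)]
      have hsd := sum_take_drop fl ((i - k).toNat + 1)
      rw [show (i + 1 - k).toNat = (i - k).toNat + 1 by omega]
      omega
  set W := (fl.drop (i + 1 - k).toNat).sum with hW
  set b := PySem.List.pyGetD cs i ' ' with hb
  set a := PySem.List.pyGetD cs (i - 1) ' ' with ha
  set d : Int := if ((a == '+') != (b == '+')) then 1 else 0 with hd
  set f : Int := if i ≥ k then PySem.Int.mod (d + PySem.List.pyGetD fl (i - k) 0) 2 else d with hf
  have hg : k ≤ i → (PySem.List.pyGetD fl (i - k) 0 = 0 ∨ PySem.List.pyGetD fl (i - k) 0 = 1) := by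
    intro hik
    rw [PySem.List.pyGetD_eq_getElem fl 0 (by omega) (by omega)]
    exact h01 _ (List.getElem_mem _)
  have hQW : (fl.drop (i - k).toNat).sum
      = (if k ≤ i then PySem.List.pyGetD fl (i - k) 0 else 0) + W := by
    by_cases hik : k ≤ i
    · have hm : (i - k).toNat < fl.length := by omega
      rw [if_pos hik, hW, sum_drop_succ fl (i - k).toNat hm,
          show (i + 1 - k).toNat = (i - k).toNat + 1 by omega]
      congr 1
      rw [PySem.List.pyGetD_eq_getElem fl 0 (by omega) (by omega), List.getD_eq_getElem _ _ hm]
    · rw [if_neg hik, hW, show (i - k).toNat = 0 by omega,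
          show (i + 1 - k).toNat = 0 by omega]
      ring
  rw [hQW] at hinv
  have hdrop : ((fl ++ [f]).drop (i + 1 - k).toNat).sum = W + f := by
    rw [List.drop_append_of_le_length (by omega), List.sum_append, ← hW]
    simp
  have main : ((if pyHappy b then (PySem.Int.mod W 2 != 0) else !(PySem.Int.mod W 2 != 0)) = (f == 1))
      ∧ (f = 0 ∨ f = 1) ∧ (W + f) % 2 = (if b == '+' then 0 else 1) := by
    by_cases hik : k ≤ i
    · have hfe : f = PySem.Int.mod (d + PySem.List.pyGetD fl (i - k) 0) 2 := by
        rw [hf, if_pos (show i ≥ k from hik)]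
      rw [if_pos hik] at hinv
      rw [hd] at hfe
      rcases hg hik with hg0 | hg0 <;> by_cases hp : (a == '+') = true <;>
        by_cases hq : (b == '+') = true <;>
        (rw [hg0] at hinv hfe
         simp only [hp, hq, hmod] at hfe
         norm_num at hfe
         simp [hp] at hinv
         refine ⟨?_, by omega, by simp [hq]; omega⟩
         simp only [pyHappy, hmod, hfe, hq]
         rcases Int.emod_two_eq W with h2 | h2 <;> rw [h2] <;>
           first | rfl | decide | (exfalso; omega))
    · have hfe : f = d := by
        rw [hf, if_neg (show ¬ i ≥ k from hik)]
      rw [if_neg hik] at hinv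
      rw [hd] at hfe
      by_cases hp : (a == '+') = true <;> by_cases hq : (b == '+') = true <;>
        (simp only [hp, hq] at hfe
         norm_num at hfe
         simp [hp] at hinv
         refine ⟨?_, by omega, by simp [hq]; omega⟩
         simp only [pyHappy, hmod, hfe, hq]
         rcases Int.emod_two_eq W with h2 | h2 <;> rw [h2] <;>
           first | rfl | decide | (exfalso; omega))
  refine ⟨f, ?_, main.2.1, ?_, by rw [hdrop]; exact main.2.2⟩
  · simp only [stepB]
    rw [← ha, ← hb, ← hd, ← hf]
  · simp only [stepA, ← hb]
    rw [hc, main.1, table_last i fl hi hfl, pref_append]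
    rcases main.2.1 with h | h <;> simp [h, List.sum_append]

lemma loop_eq (cs : List Char) (k M : Int) (hk : 1 ≤ k) :
    ∀ (n : Nat) (i : Int) (fl : List Int) (σ : List Char),
      1 ≤ i → fl.length = i.toNat → (∀ x ∈ fl, x = 0 ∨ x = 1) →
      (fl.drop (i - k).toNat).sum % 2
        = (if PySem.List.pyGetD cs (i - 1) ' ' == '+' then 0 else 1) →
      n = (M - i).toNat →
      ((PySem.List.pyRange i M 1).foldl (stepA cs k) (σ, pref 0 fl, fl.sum)).2
        = (fun fl' : List Int => (pref 0 fl', fl'.sum))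
            ((PySem.List.pyRange i M 1).foldl (stepB cs k) fl) := by
  intro n
  induction n with
  | zero =>
    intro i fl σ hi hfl h01 hinv hn
    rw [PySem.List.pyRange_one_eq_nil (by omega)]
    rfl
  | succ n ih =>
    intro i fl σ hi hfl h01 hinv hn
    rw [PySem.List.pyRange_one_cons (by omega)]
    obtain ⟨f, hB, hf01, hA, hinv'⟩ := step_eq cs k i fl σ hk hi hfl h01 hinv
    simp only [List.foldl_cons, hB]
    have hA' : stepA cs k (σ, pref 0 fl, fl.sum) i
        = ((stepA cs k (σ, pref 0 fl, fl.sum) i).1, pref 0 (fl ++ [f]), (fl ++ [f]).sum) := by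
      rw [← hA]
    rw [hA']
    refine ih (i + 1) (fl ++ [f]) _ (by omega) (by simp; omega) ?_ ?_ (by omega)
    · intro x hx
      rcases List.mem_append.mp hx with h | h
      · exact h01 x h
      · simp at h; omega
    · rw [show i + 1 - 1 = i by ring]; exact hinv'

-- ===== VERDICT (by name: the statement is the Claim_ definition above) =====
theorem solve_left_spec : Claim_equal_solve_left := by
  intro s k _hdom hpre
  obtain ⟨hne, hk⟩ := hpre
  unfold Spec_solve_left solve_left solve_left_alt
  dsimp only
  set cs := s.toList with hcs
  set f0 : Int := if PySem.List.pyGetD cs 0 ' ' == '+' then 0 else 1 with hf0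
  have hinit : (if pyHappy (PySem.List.pyGetD cs 0 ' ') then (['0'], [0], 0)
      else (['1'], [(1:Int)], (1:Int)) : List Char × List Int × Int)
      = ((if pyHappy (PySem.List.pyGetD cs 0 ' ') then ['0'] else ['1']), pref 0 [f0], [f0].sum) := by
    by_cases h : (PySem.List.pyGetD cs 0 ' ' == '+') = true <;> simp [pyHappy, h, hf0, pref]
  have hloop := loop_eq cs k ((cs.length : Int) - k + 1) hk
      (((cs.length : Int) - k + 1 - 1)).toNat 1 [f0]
      (if pyHappy (PySem.List.pyGetD cs 0 ' ') then ['0'] else ['1'])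
      (le_refl 1) (by simp) (by intro x hx; rw [List.mem_singleton] at hx; subst hx; rw [hf0]; split <;> simp)
      (by rw [show ((1:Int) - k).toNat = 0 by omega, List.drop_zero,
              show (1:Int) - 1 = 0 by ring]
          simp only [List.sum_cons, List.sum_nil, add_zero]
          rw [hf0]; split <;> simp)
      rfl
  rw [hinit, hloop, pass2_eq]
  simp
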